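-- pv_equiv track=rewrite | github.com/SueAli/cs-problems | UVA/10252 Common Permutation.py | getCommonPerm
-- ===== SOURCE A (Python) =====
-- from collections import Counter
--
-- def getCommonPerm(a, b):
--   res = []
--   a_cnt = Counter(a)
--   b_cnt = Counter(b)
--   for a_chr, a_freq in a_cnt.items():
--     if a_chr in b_cnt:
--       occr = min(a_freq, b_cnt[a_chr])
--       while occr > 0 :
--         occr -= 1
--         res.append(a_chr)
--   res.sort()
--   return "".join(res)
-- ===== SOURCE B (Python) =====
-- def getCommonPerm(a, b):
--     sa = sorted(a)
--     sb = sorted(b)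
--     i = 0
--     j = 0
--     res = []
--     while i < len(sa) and j < len(sb):
--         if sa[i] == sb[j]:
--             res.append(sa[i])
--             i += 1
--             j += 1
--         elif sa[i] < sb[j]:
--             i += 1
--         else:
--             j += 1
--     return "".join(res)
-- ===== Notes on version B (the rewrite author's own statement) =====
-- stated objective: alternative
-- what changed: Replaces the Counter-based frequency intersection followed by a final sort with a two-pointer merge over the two sorted strings that emits the common characters already in order.
import Mathlib
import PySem

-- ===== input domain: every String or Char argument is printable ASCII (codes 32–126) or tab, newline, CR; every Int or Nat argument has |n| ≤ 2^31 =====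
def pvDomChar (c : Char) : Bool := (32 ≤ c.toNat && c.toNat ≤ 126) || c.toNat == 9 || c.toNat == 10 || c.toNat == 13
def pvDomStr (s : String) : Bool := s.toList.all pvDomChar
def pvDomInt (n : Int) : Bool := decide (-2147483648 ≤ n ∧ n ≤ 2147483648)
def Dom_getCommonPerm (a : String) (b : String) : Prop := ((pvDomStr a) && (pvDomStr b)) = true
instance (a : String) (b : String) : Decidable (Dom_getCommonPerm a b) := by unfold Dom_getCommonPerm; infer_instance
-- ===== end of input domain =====

-- B replaces A's Counter intersection + final sort by a two-pointer merge of the two sorted strings (alternative algorithm, same cost).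

-- ===== PORT A =====
-- the inner 'while occr > 0: occr -= 1; res.append(a_chr)' loop
def pvWhileApp (occr : Int) (c : Char) (res : List Char) : List Char :=
  if occr > 0 then pvWhileApp (occr - 1) c (res ++ [c]) else res
termination_by occr.toNat
decreasing_by omega

def getCommonPerm (a : String) (b : String) : String :=
  let a_cnt := PySem.Dict.counter a.toList
  let b_cnt := PySem.Dict.counter b.toList
  let res := a_cnt.items.foldl (fun res p =>
    if b_cnt.contains p.1 then pvWhileApp (min p.2 (b_cnt.getD p.1 0)) p.1 res else res) []
  String.mk (PySem.List.sorted res (fun x => x) false)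

-- ===== PORT B =====
-- the 'while i < len(sa) and j < len(sb)' two-pointer loop, as structural recursion on the suffixes
def pvMerge : List Char → List Char → List Char
  | x :: s, y :: t =>
      if x = y then x :: pvMerge s t
      else if x < y then pvMerge s (y :: t)
      else pvMerge (x :: s) t
  | _, _ => []

def getCommonPerm_alt (a : String) (b : String) : String :=
  String.mk (pvMerge (PySem.List.sorted a.toList (fun x => x) false)
                     (PySem.List.sorted b.toList (fun x => x) false))

-- ===== PRECONDITION & SPEC =====
def Spec_getCommonPerm (a : String) (b : String) (out : String) : Prop := out = getCommonPerm_alt a b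
instance (a : String) (b : String) (out : String) : Decidable (Spec_getCommonPerm a b out) := by unfold Spec_getCommonPerm; infer_instance

-- ===== CLAIM (what is proved, stated in full; the proofs are below) =====
def Claim_equal_getCommonPerm : Prop := ∀ (a : String) (b : String), Dom_getCommonPerm a b → Spec_getCommonPerm a b (getCommonPerm a b)

-- ===== LEMMAS AND PROOFS =====

theorem pvWhileApp_eq (occr : Int) (c : Char) (res : List Char) :
    pvWhileApp occr c res = res ++ List.replicate occr.toNat c := by
  fun_induction pvWhileApp occr c res with
  | case1 occr res h ih =>
      have hn : occr.toNat = (occr - 1).toNat + 1 := by omega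
      rw [ih, hn, List.replicate_succ, List.append_assoc]
      rfl
  | case2 occr res h =>
      have hn : occr.toNat = 0 := by omega
      simp [hn]

theorem foldlA_eq (bcnt : PySem.Dict Char Int) (l : List (Char × Int)) (init : List Char) :
    l.foldl (fun res p =>
      if bcnt.contains p.1 then pvWhileApp (min p.2 (bcnt.getD p.1 0)) p.1 res else res) init
    = init ++ l.flatMap (fun p =>
      if bcnt.contains p.1 then List.replicate (min p.2 (bcnt.getD p.1 0)).toNat p.1 else []) := by
  induction l generalizing init with
  | nil => simp
  | cons p l ih =>
      simp only [List.foldl_cons, List.flatMap_cons]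
      by_cases h : bcnt.contains p.1
      · rw [if_pos h, pvWhileApp_eq, ih, if_pos h, List.append_assoc]
      · rw [if_neg h, ih, if_neg h]
        simp

theorem count_flatMap_nodup (g : Char → List Char) (hg : ∀ k x, x ∈ g k → x = k) :
    ∀ (ks : List Char), ks.Nodup → ∀ c,
      (ks.flatMap g).count c = if c ∈ ks then (g c).count c else 0 := by
  intro ks
  induction ks with
  | nil => intro _ c; simp
  | cons k ks ih =>
      intro hnd c
      have hnd' := hnd
      rw [List.nodup_cons] at hnd'
      rw [List.flatMap_cons, List.count_append, ih hnd'.2 c]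
      by_cases hck : c = k
      · subst hck
        have : c ∉ ks := hnd'.1
        simp [this]
      · have h0 : (g k).count c = 0 := by
          rw [List.count_eq_zero]
          intro hmem
          exact hck (hg k c hmem)
        simp [h0, hck]

theorem countL_eq (al bl : List Char) (c : Char) :
    ((PySem.Dict.counter al).items.foldl (fun res p =>
      if (PySem.Dict.counter bl).contains p.1 then
        pvWhileApp (min p.2 ((PySem.Dict.counter bl).getD p.1 0)) p.1 res else res) []).count c
    = min (al.count c) (bl.count c) := by
  rw [foldlA_eq, PySem.Dict.items_counter, List.flatMap_map]
  set g : Char → List Char := fun k =>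
    if (PySem.Dict.counter bl).contains k then
      List.replicate (min ((al.count k : Int)) ((PySem.Dict.counter bl).getD k 0)).toNat k
    else [] with hgdef
  have hg : ∀ k x, x ∈ g k → x = k := by
    intro k x hx
    simp only [hgdef] at hx
    split at hx
    · exact List.eq_of_mem_replicate hx
    · simp at hx
  have hcnt := count_flatMap_nodup g hg (PySem.Set.ofList al) (PySem.Set.nodup_ofList al) c
  simp only [List.nil_append]
  rw [hcnt]
  by_cases hca : c ∈ al
  · rw [if_pos ((PySem.Set.mem_ofList al c).mpr hca)]
    simp only [hgdef]
    by_cases hcb : c ∈ bl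
    · rw [if_pos (by rw [PySem.Dict.contains_counter]; exact List.contains_iff_mem.mpr hcb)]
      rw [PySem.Dict.getD_counter, List.count_replicate_self]
      omega
    · have hb0 : bl.count c = 0 := List.count_eq_zero.mpr hcb
      rw [if_neg (by rw [PySem.Dict.contains_counter]; simp [hcb])]
      simp [hb0]
  · rw [if_neg (fun h => hca ((PySem.Set.mem_ofList al c).mp h))]
    have ha0 : al.count c = 0 := List.count_eq_zero.mpr hca
    simp [ha0]

theorem count_head_zero (y : Char) (t : List Char) (c : Char)
    (ht : (y :: t).Pairwise (· ≤ ·)) (hlt : c < y) : (y :: t).count c = 0 := by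
  rw [List.count_eq_zero]
  intro hmem
  have hyc : y ≤ c := by
    rcases List.mem_cons.mp hmem with h | h
    · exact le_of_eq h.symm
    · exact (List.pairwise_cons.mp ht).1 c h
  exact absurd hlt (not_lt.mpr hyc)

theorem pvMerge_eq_of_eq (x : Char) (s t : List Char) :
    pvMerge (x :: s) (x :: t) = x :: pvMerge s t := by
  simp [pvMerge]

theorem pvMerge_eq_of_lt (x y : Char) (s t : List Char) (hxy : x ≠ y) (hlt : x < y) :
    pvMerge (x :: s) (y :: t) = pvMerge s (y :: t) := by
  simp [pvMerge, hxy, hlt]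

theorem pvMerge_eq_of_gt (x y : Char) (s t : List Char) (hxy : x ≠ y) (hlt : ¬ x < y) :
    pvMerge (x :: s) (y :: t) = pvMerge (x :: s) t := by
  simp [pvMerge, hxy, hlt]

theorem pvMerge_count (c : Char) :
    ∀ (s : List Char), s.Pairwise (· ≤ ·) → ∀ (t : List Char), t.Pairwise (· ≤ ·) →
      (pvMerge s t).count c = min (s.count c) (t.count c) := by
  intro s
  induction s with
  | nil => intro _ t _; simp [pvMerge]
  | cons x s ihs =>
      intro hs t
      induction t with
      | nil => intro _; simp [pvMerge]
      | cons y t iht =>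
          intro ht
          rw [List.pairwise_cons] at hs ht
          by_cases hxy : x = y
          · subst hxy
            rw [pvMerge_eq_of_eq, List.count_cons, List.count_cons, List.count_cons,
              ihs hs.2 t ht.2]
            by_cases hcx : x = c <;> simp [hcx]
          · by_cases hlt : x < y
            · rw [pvMerge_eq_of_lt x y s t hxy hlt,
                ihs hs.2 (y :: t) (List.pairwise_cons.mpr ht)]
              by_cases hcx : c = x
              · subst hcx
                have h0 : (y :: t).count c = 0 :=
                  count_head_zero y t c (List.pairwise_cons.mpr ht) hlt
                rw [h0]
                simp
              · rw [List.count_cons_of_ne (fun h => hcx h.symm)]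
            · have hylt : y < x := lt_of_le_of_ne (not_lt.mp hlt) (Ne.symm hxy)
              rw [pvMerge_eq_of_gt x y s t hxy hlt, iht ht.2]
              by_cases hcy : c = y
              · subst hcy
                have h0 : (x :: s).count c = 0 :=
                  count_head_zero x s c (List.pairwise_cons.mpr hs) hylt
                rw [h0]
                simp
              · rw [List.count_cons_of_ne (fun h => hcy h.symm)]

theorem pvMerge_mem : ∀ (s t : List Char) (z : Char), z ∈ pvMerge s t → z ∈ s ∨ z ∈ t := by
  intro s
  induction s with
  | nil => intro t z h; simp [pvMerge] at h
  | cons x s ihs =>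
      intro t
      induction t with
      | nil => intro z h; simp [pvMerge] at h
      | cons y t iht =>
          intro z h
          by_cases hxy : x = y
          · subst hxy
            rw [pvMerge_eq_of_eq, List.mem_cons] at h
            rcases h with h | h
            · exact Or.inl (List.mem_cons.mpr (Or.inl h))
            · rcases ihs t z h with h' | h'
              · exact Or.inl (List.mem_cons.mpr (Or.inr h'))
              · exact Or.inr (List.mem_cons.mpr (Or.inr h'))
          · by_cases hlt : x < y
            · rw [pvMerge_eq_of_lt x y s t hxy hlt] at h
              rcases ihs (y :: t) z h with h' | h'
              · exact Or.inl (List.mem_cons.mpr (Or.inr h'))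
              · exact Or.inr h'
            · rw [pvMerge_eq_of_gt x y s t hxy hlt] at h
              rcases iht z h with h' | h'
              · exact Or.inl h'
              · exact Or.inr (List.mem_cons.mpr (Or.inr h'))

theorem pvMerge_pairwise :
    ∀ (s : List Char), s.Pairwise (· ≤ ·) → ∀ (t : List Char), t.Pairwise (· ≤ ·) →
      (pvMerge s t).Pairwise (· ≤ ·) := by
  intro s
  induction s with
  | nil => intro _ t _; simp [pvMerge]
  | cons x s ihs =>
      intro hs t
      induction t with
      | nil => intro _; simp [pvMerge]
      | cons y t iht =>
          intro ht
          rw [List.pairwise_cons] at hs ht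
          by_cases hxy : x = y
          · subst hxy
            rw [pvMerge_eq_of_eq, List.pairwise_cons]
            refine ⟨?_, ihs hs.2 t ht.2⟩
            intro z hz
            rcases pvMerge_mem s t z hz with h' | h'
            · exact hs.1 z h'
            · exact ht.1 z h'
          · by_cases hlt : x < y
            · rw [pvMerge_eq_of_lt x y s t hxy hlt]
              exact ihs hs.2 (y :: t) (List.pairwise_cons.mpr ht)
            · rw [pvMerge_eq_of_gt x y s t hxy hlt]
              exact iht ht.2

-- ===== VERDICT (by name: the statement is the Claim_ definition above) =====
theorem getCommonPerm_spec : Claim_equal_getCommonPerm := by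
  intro a b _
  unfold Spec_getCommonPerm getCommonPerm getCommonPerm_alt
  set al := a.toList
  set bl := b.toList
  set sa := PySem.List.sorted al (fun x => x) false with hsa
  set sb := PySem.List.sorted bl (fun x => x) false with hsb
  have hpa : sa.Pairwise (· ≤ ·) := by
    have := PySem.List.sorted_pairwise (xs := al) (key := fun x => x)
    simpa [hsa] using this
  have hpb : sb.Pairwise (· ≤ ·) := by
    have := PySem.List.sorted_pairwise (xs := bl) (key := fun x => x)
    simpa [hsb] using this
  have hperm : (pvMerge sa sb).Perm
      ((PySem.Dict.counter al).items.foldl (fun res p =>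
        if (PySem.Dict.counter bl).contains p.1 then
          pvWhileApp (min p.2 ((PySem.Dict.counter bl).getD p.1 0)) p.1 res else res) []) := by
    rw [List.perm_iff_count]
    intro c
    rw [countL_eq al bl c, pvMerge_count c sa hpa sb hpb]
    rw [(PySem.List.sorted_perm al (fun x => x) false).count_eq,
        (PySem.List.sorted_perm bl (fun x => x) false).count_eq]
  have heq := PySem.List.sorted_id_eq_of_perm_of_pairwise _ _ hperm
      (pvMerge_pairwise sa hpa sb hpb)
  simp only [heq]
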